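-- pv_equiv track=rewrite | github.com/EDA-Teaching-RJH/assignment-foundations-of-programming-Adan-Khan1 | fleet_manager.py | calculate_payroll
-- ===== SOURCE A (Python) =====
-- def calculate_payroll(ranks):
--     total_cost = 0
--     for rank in ranks:
--         if rank == "Captain":
--             total_cost += 1000
--         elif rank == "Commander":
--             total_cost += 800
--         elif rank == "Lt. Commander":
--             total_cost += 600
--         elif rank == "Lieutenant":
--             total_cost += 400
--         else:
--             total_cost += 200
--
--     return total_cost
-- ===== SOURCE B (Python) =====
-- def calculate_payroll(ranks):
--     counts = {}
--     for r in ranks: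
--         counts[r] = counts.get(r, 0) + 1
--     costs = {"Captain": 1000, "Commander": 800, "Lt. Commander": 600, "Lieutenant": 400}
--     return sum(c * costs.get(r, 200) for r, c in counts.items())
-- ===== Notes on version B (the rewrite author's own statement) =====
-- stated objective: alternative
-- what changed: B builds a frequency table of the ranks in one pass and then sums count*cost over the distinct ranks via a rank->cost mapping with default 200, instead of A's per-element if/elif chain accumulating a running total.
import Mathlib
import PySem

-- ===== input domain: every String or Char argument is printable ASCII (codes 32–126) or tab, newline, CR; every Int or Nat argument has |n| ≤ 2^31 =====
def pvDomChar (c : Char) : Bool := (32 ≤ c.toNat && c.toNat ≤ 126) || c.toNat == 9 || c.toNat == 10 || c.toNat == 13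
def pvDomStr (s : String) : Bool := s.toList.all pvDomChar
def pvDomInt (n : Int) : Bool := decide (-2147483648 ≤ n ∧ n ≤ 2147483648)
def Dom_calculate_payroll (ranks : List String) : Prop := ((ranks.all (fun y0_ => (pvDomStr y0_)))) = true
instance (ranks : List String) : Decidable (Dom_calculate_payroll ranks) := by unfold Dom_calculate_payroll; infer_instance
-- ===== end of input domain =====

-- B builds a one-pass frequency table and sums count*cost over distinct ranks; A adds a cost per element via an if/elif chain. Return values proved equal.

-- ===== PORT A =====
def calculate_payroll (ranks : List String) : Int :=
  ranks.foldl (fun total_cost rank =>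
    if rank == "Captain" then total_cost + 1000
    else if rank == "Commander" then total_cost + 800
    else if rank == "Lt. Commander" then total_cost + 600
    else if rank == "Lieutenant" then total_cost + 400
    else total_cost + 200) 0

-- ===== PORT B =====
def pvCosts : PySem.Dict String Int :=
  PySem.Dict.ofList [("Captain", 1000), ("Commander", 800), ("Lt. Commander", 600), ("Lieutenant", 400)]

def calculate_payroll_alt (ranks : List String) : Int :=
  let counts := ranks.foldl (fun d r => d.insert r (d.getD r 0 + 1)) PySem.Dict.empty
  (counts.items.map (fun p => p.2 * pvCosts.getD p.1 200)).sum

-- ===== PRECONDITION & SPEC =====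
def Spec_calculate_payroll (ranks : List String) (out : Int) : Prop := out = calculate_payroll_alt ranks
instance (ranks : List String) (out : Int) : Decidable (Spec_calculate_payroll ranks out) := by unfold Spec_calculate_payroll; infer_instance

-- ===== CLAIM (what is proved, stated in full; the proofs are below) =====
def Claim_equal_calculate_payroll : Prop := ∀ (ranks : List String), Dom_calculate_payroll ranks → Spec_calculate_payroll ranks (calculate_payroll ranks)

-- ===== LEMMAS AND PROOFS =====

-- the per-rank cost both programs use
def pvCost (r : String) : Int :=
  if r == "Captain" then 1000
  else if r == "Commander" then 800
  else if r == "Lt. Commander" then 600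
  else if r == "Lieutenant" then 400
  else 200

theorem pvCosts_getD (r : String) : pvCosts.getD r 200 = pvCost r := by
  have h : pvCosts = PySem.Dict.mk [("Captain", 1000), ("Commander", 800), ("Lt. Commander", 600), ("Lieutenant", 400)] := by decide
  rw [h, PySem.Dict.getD_eq_get?_getD]
  simp only [PySem.Dict.get?_mk_cons, pvCost]
  split_ifs <;> simp_all [PySem.Dict.get?]

theorem calcA_eq_sum (ranks : List String) :
    calculate_payroll ranks = (ranks.map pvCost).sum := by
  unfold calculate_payroll
  have h : ∀ (t : Int) (r : String), r ∈ ranks →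
      (if r == "Captain" then t + 1000
       else if r == "Commander" then t + 800
       else if r == "Lt. Commander" then t + 600
       else if r == "Lieutenant" then t + 400
       else t + 200) = t + pvCost r := by
    intro t r _
    simp only [pvCost]
    split_ifs <;> rfl
  calc List.foldl _ 0 ranks
      = ranks.foldl (fun t r => t + pvCost r) 0 := PySem.List.foldl_congr_mem ranks _ _ 0 h
    _ = (ranks.map pvCost).sum := by rw [PySem.List.foldl_add]; simp

theorem sum_ite_single {α : Type} [DecidableEq α] (S : List α) (x : α) (f : α → Int)
    (hnd : S.Nodup) (hx : x ∈ S) :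
    (S.map (fun k => (if x = k then (1 : Int) else 0) * f k)).sum = f x := by
  induction S with
  | nil => cases hx
  | cons a S ih =>
    rcases List.mem_cons.mp hx with rfl | hm
    · have hnot : ∀ k ∈ S, ¬ x = k := by
        intro k hk he; exact (List.nodup_cons.mp hnd).1 (he ▸ hk)
      simp only [List.map_cons, List.sum_cons]
      have : (S.map (fun k => (if x = k then (1 : Int) else 0) * f k)).sum = 0 := by
        apply List.sum_eq_zero
        intro y hy
        rcases List.mem_map.mp hy with ⟨k, hk, rfl⟩
        simp [hnot k hk]
      rw [this]; simp
    · have hne : ¬ x = a := by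
        intro he; exact (List.nodup_cons.mp hnd).1 (he ▸ hm)
      simp only [List.map_cons, List.sum_cons, if_neg hne, zero_mul, zero_add]
      exact ih (List.nodup_cons.mp hnd).2 hm

theorem sum_count_mul {α : Type} [DecidableEq α] (xs : List α) (f : α → Int) :
    ((PySem.Set.ofList xs).map (fun k => (xs.count k : Int) * f k)).sum = (xs.map f).sum := by
  induction xs using List.reverseRecOn with
  | nil => rfl
  | append_singleton t x ih =>
    have hof : PySem.Set.ofList (t ++ [x]) = PySem.Set.add (PySem.Set.ofList t) x := by
      rw [PySem.Set.ofList_eq_foldl, PySem.Set.ofList_eq_foldl, List.foldl_append]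
      rfl
    have hcount : ∀ k, ((t ++ [x]).count k : Int) = (t.count k : Int) + (if x = k then 1 else 0) := by
      intro k
      rw [List.count_append]
      by_cases h : x = k
      · subst h; simp
      · rw [List.count_eq_zero_of_not_mem (fun he => h (List.mem_singleton.mp he).symm)]
        simp [h]
    rw [hof, List.map_append, List.sum_append, List.map_singleton, List.sum_singleton, ← ih]
    by_cases hx : x ∈ PySem.Set.ofList t
    · have hadd : PySem.Set.add (PySem.Set.ofList t) x = PySem.Set.ofList t := by
        simp [PySem.Set.add, PySem.Set.contains, hx]
      rw [hadd]
      have hsplit : ∀ k, ((t ++ [x]).count k : Int) * f k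
          = (t.count k : Int) * f k + (if x = k then (1:Int) else 0) * f k := by
        intro k; rw [hcount k]; ring
      calc (List.map (fun k => ((t ++ [x]).count k : Int) * f k) (PySem.Set.ofList t)).sum
          = (List.map (fun k => (t.count k : Int) * f k + (if x = k then (1:Int) else 0) * f k) (PySem.Set.ofList t)).sum := by
            exact congrArg List.sum (List.map_congr_left (fun k _ => hsplit k))
        _ = (List.map (fun k => (t.count k : Int) * f k) (PySem.Set.ofList t)).sum + f x := by
            rw [PySem.List.sum_map_add_int]
            rw [sum_ite_single (PySem.Set.ofList t) x f (PySem.Set.nodup_ofList t) hx]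
    · have hadd : PySem.Set.add (PySem.Set.ofList t) x = PySem.Set.ofList t ++ [x] := by
        simp [PySem.Set.add, PySem.Set.contains, hx]
      have hxt : x ∉ t := fun h => hx ((PySem.Set.mem_ofList t x).mpr h)
      rw [hadd, List.map_append, List.sum_append, List.map_singleton, List.sum_singleton]
      have h1 : ((t ++ [x]).count x : Int) * f x = f x := by
        rw [hcount x, List.count_eq_zero_of_not_mem hxt]
        simp
      have h2 : (List.map (fun k => ((t ++ [x]).count k : Int) * f k) (PySem.Set.ofList t)).sum
          = (List.map (fun k => (t.count k : Int) * f k) (PySem.Set.ofList t)).sum := by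
        apply congrArg List.sum
        apply List.map_congr_left
        intro k hk
        have hkx : ¬ x = k := fun he => hx (he ▸ hk)
        rw [hcount k, if_neg hkx]
        ring
      rw [h1, h2]

-- ===== VERDICT (by name: the statement is the Claim_ definition above) =====
theorem calculate_payroll_spec : Claim_equal_calculate_payroll := by
  intro ranks _
  show calculate_payroll ranks = calculate_payroll_alt ranks
  rw [calcA_eq_sum]
  unfold calculate_payroll_alt
  rw [PySem.Dict.foldl_insert_getD_add_one_eq_counter]
  show _ = (List.map _ (PySem.Dict.counter ranks).items).sum
  rw [PySem.Dict.items_counter]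
  rw [List.map_map]
  rw [← sum_count_mul ranks pvCost]
  congr 1
  apply List.map_congr_left
  intro k _
  simp [pvCosts_getD]
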